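-- pv_equiv track=rewrite | github.com/shadabkhaninv-prog/Monumental | ip_dashboard.py | order_symbols_by_sector
-- ===== SOURCE A (Python) =====
-- from typing import Dict, List, Optional, Set, Tuple
--
-- def order_symbols_by_sector(symbols: List[str], sector_map: Dict[str, str]) -> List[str]:
--     if not symbols:
--         return []
--     original_index = {sym: idx for idx, sym in enumerate(symbols)}
--     sector_order: Dict[str, int] = {}
--     for sym in symbols:
--         sector = sector_map.get(sym.upper(), "Unknown")
--         if sector not in sector_order:
--             sector_order[sector] = len(sector_order)
--     return sorted(
--         symbols,
--         key=lambda sym: (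
--             sector_order.get(sector_map.get(sym.upper(), "Unknown"), 10_000),
--             sector_map.get(sym.upper(), "Unknown"),
--             original_index[sym],
--         ),
--     )
-- ===== SOURCE B (Python) =====
-- from typing import Dict, List
--
-- def order_symbols_by_sector(symbols: List[str], sector_map: Dict[str, str]) -> List[str]:
--     buckets: Dict[str, List[str]] = {}
--     for sym in symbols:
--         sector = sector_map.get(sym.upper(), "Unknown")
--         buckets.setdefault(sector, []).append(sym)
--     out: List[str] = []
--     for group in buckets.values():
--         out.extend(group)
--     return out
-- ===== Notes on version B (the rewrite author's own statement) =====
-- stated objective: faster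
-- what changed: Replaces the comparison sort under a (sector-rank, sector, original-index) tuple key by a single pass that buckets symbols per sector in a first-appearance-ordered dict and concatenates the buckets; Pre_ excludes symbol lists with duplicate entries, on which A's ordering keyed by each duplicate's last index is accidental.
-- outside the precondition, e.g. on order_symbols_by_sector(['X', 'Y', 'X'], {'X': 'T', 'Y': 'T'}): A returns ['Y', 'X', 'X'], B returns ['X', 'Y', 'X']
import Mathlib
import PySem

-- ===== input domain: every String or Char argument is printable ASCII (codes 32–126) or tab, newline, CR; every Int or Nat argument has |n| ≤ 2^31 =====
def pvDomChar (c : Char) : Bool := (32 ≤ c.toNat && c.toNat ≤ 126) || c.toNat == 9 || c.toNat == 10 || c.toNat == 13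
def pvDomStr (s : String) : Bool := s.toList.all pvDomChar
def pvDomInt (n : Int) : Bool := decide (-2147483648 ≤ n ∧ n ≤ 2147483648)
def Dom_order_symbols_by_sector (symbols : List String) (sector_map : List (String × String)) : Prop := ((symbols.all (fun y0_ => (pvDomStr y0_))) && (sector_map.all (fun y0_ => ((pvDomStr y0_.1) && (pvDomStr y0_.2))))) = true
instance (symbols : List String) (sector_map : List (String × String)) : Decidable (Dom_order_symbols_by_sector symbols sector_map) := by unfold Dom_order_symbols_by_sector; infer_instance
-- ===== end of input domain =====

-- ===== PORT A =====
-- B buckets symbols per sector in one pass instead of sorting; proved equal to A on duplicate-free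
-- symbol lists (A's return value only — neither program mutates its arguments).

-- sector_map.get(sym.upper(), "Unknown")  (shared subexpression of both Pythons)
def pvSectorOf (sector_map : List (String × String)) (sym : String) : String :=
  (PySem.Dict.mk sector_map).getD (PySem.Str.upper sym) "Unknown"

-- Python's 3-tuple key comparison, ported by hand (tuples compare lexicographically; the sector
-- string is compared as its character list, Python's code-point order on this ASCII domain: exact).
def pvTupleLt (p q : Int × List Char × Int) : Bool :=
  if p.1 < q.1 then true else if q.1 < p.1 then false
  else if p.2.1 < q.2.1 then true else if q.2.1 < p.2.1 then false
  else p.2.2 < q.2.2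

-- port of A: original_index / sector_order dicts, then sorted(symbols, key=…) — written in
-- PySem's stable-insertion-sort shape (PySem.List.sorted_eq_foldl_insertBy is rfl) with the
-- 3-tuple key compared by pvTupleLt above.
-- original_index[sym] is ported as getD sym 0: sym is always a key (KeyError impossible), exact.
def order_symbols_by_sector (symbols : List String) (sector_map : List (String × String)) : List String :=
  if symbols = [] then []
  else
    let original_index : PySem.Dict String Int :=
      (PySem.List.enumerate symbols).foldl (fun d p => d.insert p.2 p.1) PySem.Dict.empty
    let sector_order : PySem.Dict String Int :=
      symbols.foldl (fun d sym =>
        let sector := pvSectorOf sector_map sym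
        if d.contains sector then d else d.insert sector (d.size : Int)) PySem.Dict.empty
    symbols.foldl (fun acc sym => PySem.List.insertBy
      (fun a b => pvTupleLt
        (sector_order.getD (pvSectorOf sector_map a) 10000, (pvSectorOf sector_map a).toList,
          original_index.getD a 0)
        (sector_order.getD (pvSectorOf sector_map b) 10000, (pvSectorOf sector_map b).toList,
          original_index.getD b 0))
      sym acc) []

-- ===== PORT B =====
def order_symbols_by_sector_alt (symbols : List String) (sector_map : List (String × String)) : List String :=
  let buckets : PySem.Dict String (List String) :=
    symbols.foldl (fun d sym => d.modify (pvSectorOf sector_map sym) [] (· ++ [sym])) PySem.Dict.empty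
  buckets.values.foldl (fun out group => out ++ group) []

-- ===== PRECONDITION & SPEC =====
-- Pre_ excludes symbol lists containing the same symbol twice: there A keys original_index by
-- symbol, so every duplicate is ranked by its LAST position and the sort may move an
-- earlier-first-seen symbol after a later one — an accidental order no caller would specify.
def Pre_order_symbols_by_sector (symbols : List String) (_sector_map : List (String × String)) : Prop :=
  symbols.Nodup

instance (symbols : List String) (sector_map : List (String × String)) : Decidable (Pre_order_symbols_by_sector symbols sector_map) := by unfold Pre_order_symbols_by_sector; infer_instance

def pvWitness_order_symbols_by_sector : List String × (List (String × String)) :=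
  (["msft", "AAPL", "xyz"], [("AAPL", "Tech"), ("MSFT", "Tech")])

def Spec_order_symbols_by_sector (symbols : List String) (sector_map : List (String × String)) (out : List String) : Prop := out = order_symbols_by_sector_alt symbols sector_map
instance (symbols : List String) (sector_map : List (String × String)) (out : List String) : Decidable (Spec_order_symbols_by_sector symbols sector_map out) := by unfold Spec_order_symbols_by_sector; infer_instance

-- ===== CLAIM (what is proved, stated in full; the proofs are below) =====
def Claim_equal_order_symbols_by_sector : Prop := ∀ (symbols : List String) (sector_map : List (String × String)), Dom_order_symbols_by_sector symbols sector_map → Pre_order_symbols_by_sector symbols sector_map → Spec_order_symbols_by_sector symbols sector_map (order_symbols_by_sector symbols sector_map)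

-- ===== LEMMAS AND PROOFS =====

-- items of A's original_index dict: each symbol paired with its index (fresh distinct keys).
theorem pv_items_original_index (symbols : List String) (h : symbols.Nodup) :
    ((PySem.List.enumerate symbols).foldl (fun d p => d.insert p.2 p.1)
        (PySem.Dict.empty : PySem.Dict String Int)).items
      = (PySem.List.enumerate symbols).map (fun p => (p.2, p.1)) := by
  have := PySem.Dict.items_foldl_insert_fresh (PySem.List.enumerate symbols)
    (fun p => p.2) (fun p => p.1) (PySem.Dict.empty : PySem.Dict String Int)
    (by intro a _; simp [PySem.Dict.contains_empty])
    (by rw [PySem.List.map_snd_enumerate]; exact h)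
  simpa [PySem.Dict.items] using this

-- A's original_index lookup of the k-th (distinct) symbol is k.
theorem pv_getD_original_index (symbols : List String) (h : symbols.Nodup)
    (k : Nat) (hk : k < symbols.length) :
    ((PySem.List.enumerate symbols).foldl (fun d p => d.insert p.2 p.1)
        (PySem.Dict.empty : PySem.Dict String Int)).getD symbols[k] 0 = (k : Int) := by
  set d := (PySem.List.enumerate symbols).foldl (fun d p => d.insert p.2 p.1)
        (PySem.Dict.empty : PySem.Dict String Int) with hd
  have hitems := pv_items_original_index symbols h
  have hmem : (symbols[k], (k : Int)) ∈ d.items := by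
    rw [hitems]
    have hin : ((0 : Int) + k, symbols[k]) ∈ PySem.List.enumerate symbols := by
      rw [PySem.List.mem_enumerate_iff]
      exact ⟨k, hk, rfl⟩
    have := List.mem_map_of_mem (f := fun (p : Int × String) => (p.2, p.1)) hin
    simpa using this
  have hkeys : d.keys.Nodup := by
    have hk2 : d.keys = (PySem.List.enumerate symbols).map (fun p => p.2) := by
      show d.items.map (fun p => p.1) = _
      rw [hd, hitems, List.map_map]; rfl
    rw [hk2, PySem.List.map_snd_enumerate]; exact h
  exact PySem.Dict.getD_of_mem_items d hmem hkeys 0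

-- items of A's sector_order dict: the deduped sector list paired with ranks 0,1,2,…
theorem pv_items_sector_order (f : String → String) (symbols : List String) :
    (symbols.foldl (fun d sym =>
        let sector := f sym
        if d.contains sector then d else d.insert sector (d.size : Int))
        (PySem.Dict.empty : PySem.Dict String Int)).items
      = (PySem.List.dedup (symbols.map f)).zipIdx.map (fun p => (p.1, (p.2 : Int))) := by
  induction symbols using List.reverseRecOn with
  | nil => simp [PySem.List.dedup, PySem.Dict.empty]
  | append_singleton l x ih =>
    rw [List.foldl_append]
    set d := (l.foldl (fun d sym =>
        let sector := f sym
        if d.contains sector then d else d.insert sector (d.size : Int))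
        (PySem.Dict.empty : PySem.Dict String Int)) with hd
    set S := PySem.List.dedup (l.map f) with hS
    have hRHS : PySem.List.dedup ((l ++ [x]).map f) = PySem.Set.add S (f x) := by
      rw [List.map_append, PySem.List.dedup_eq_ofList, PySem.Set.ofList_eq_foldl,
        List.foldl_append, hS, PySem.List.dedup_eq_ofList, PySem.Set.ofList_eq_foldl]
      rfl
    have hkeys : d.keys = S := by
      show d.items.map (fun p => p.1) = S
      rw [ih, List.map_map]
      exact List.zipIdx_map_fst 0 S
    have hcont : d.contains (f x) = decide (f x ∈ S) := by
      classical
      rw [PySem.Dict.contains_eq_decide_mem_keys, hkeys]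
    simp only [List.foldl_cons, List.foldl_nil]
    rw [hRHS]
    by_cases hc : f x ∈ S
    · have h1 : PySem.Set.add S (f x) = S := by simp [PySem.Set.add, hc]
      have h2 : d.contains (f x) = true := by rw [hcont]; simpa using hc
      rw [h1, h2]
      simpa using ih
    · have h1 : PySem.Set.add S (f x) = S ++ [f x] := by simp [PySem.Set.add, hc]
      have hcf : d.contains (f x) = false := by rw [hcont]; simpa using hc
      have hsize : d.size = S.length := by
        show d.items.length = S.length
        rw [ih]; simp
      rw [h1, hcf]
      simp only [Bool.false_eq_true, if_false]
      rw [PySem.Dict.items_insert_of_not_contains d _ hcf, ih, List.zipIdx_append]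
      simp [hsize]

-- rank lookup of the k-th sector is k.
theorem pv_getD_sector_order (f : String → String) (symbols : List String)
    (k : Nat) (hk : k < (PySem.List.dedup (symbols.map f)).length) :
    (symbols.foldl (fun d sym =>
        let sector := f sym
        if d.contains sector then d else d.insert sector (d.size : Int))
        (PySem.Dict.empty : PySem.Dict String Int)).getD
        (PySem.List.dedup (symbols.map f))[k] 10000 = (k : Int) := by
  set S := PySem.List.dedup (symbols.map f) with hS
  set d := (symbols.foldl (fun d sym =>
        let sector := f sym
        if d.contains sector then d else d.insert sector (d.size : Int))
        (PySem.Dict.empty : PySem.Dict String Int)) with hd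
  have hitems := pv_items_sector_order f symbols
  have hmem : (S[k], (k : Int)) ∈ d.items := by
    rw [hd, hitems]
    have hz : (S[k], k) ∈ S.zipIdx := by
      have hg : S.zipIdx[k]'(by simpa using hk) = (S[k], k) := by
        simp [List.getElem_zipIdx]
      rw [← hg]; exact List.getElem_mem _
    have := List.mem_map_of_mem (f := fun p : String × Nat => (p.1, (p.2 : Int))) hz
    simpa using this
  have hnd : d.keys.Nodup := by
    have hkeys : d.keys = S := by
      show d.items.map (fun p => p.1) = S
      rw [hd, hitems, List.map_map]
      exact List.zipIdx_map_fst 0 S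
    rw [hkeys, hS]; exact PySem.List.nodup_dedup _
  exact PySem.Dict.getD_of_mem_items d hmem hnd 10000

-- B's output is the sectors in first-appearance order, each replaced by its filtered bucket.
theorem pv_alt_eq_flatMap (symbols : List String) (sector_map : List (String × String)) :
    order_symbols_by_sector_alt symbols sector_map
      = (PySem.List.dedup (symbols.map (pvSectorOf sector_map))).flatMap
          (fun s => symbols.filter (fun x => pvSectorOf sector_map x == s)) := by
  unfold order_symbols_by_sector_alt
  set f := pvSectorOf sector_map with hf
  set buckets := symbols.foldl (fun d sym => d.modify (f sym) [] (· ++ [sym]))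
      (PySem.Dict.empty : PySem.Dict String (List String)) with hb
  have hkeys : buckets.keys = PySem.List.dedup (symbols.map f) := by
    rw [hb, PySem.Dict.keys_foldl_modify_key symbols f [] (fun _ x => (· ++ [x]))]
    rw [PySem.List.dedup_eq_ofList, PySem.Set.ofList_eq_foldl]
    rfl
  have hnd : buckets.keys.Nodup := by
    rw [hkeys]; exact PySem.List.nodup_dedup _
  have hgetD : ∀ c, buckets.getD c [] = symbols.filter (fun x => f x == c) := by
    intro c
    have hfold : buckets = (symbols.map (fun s => (f s, s))).foldl
        (fun d p => d.modify p.1 [] (· ++ [p.2])) PySem.Dict.empty := by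
      rw [hb, List.foldl_map]
    rw [hfold, PySem.Dict.getD_foldl_modify_append, PySem.Dict.getD_empty]
    rw [List.filter_map, List.map_map]
    simp only [Function.comp_def]
    exact List.map_id' _
  have hvals : buckets.values = buckets.keys.map (fun k => buckets.getD k []) :=
    PySem.Dict.values_eq_map_keys buckets hnd []
  rw [PySem.List.foldl_append_eq_flatten, hvals, hkeys]
  rw [List.flatMap_def]
  simp only [List.nil_append]
  rw [List.map_congr_left
    (fun (s : String) (_ : s ∈ PySem.List.dedup (symbols.map f)) => hgetD s)]

-- grouping a list by distinct covering tags is a permutation of it.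
theorem pv_flatMap_filter_perm {α : Type} (f : α → String) (S : List String) (l : List α)
    (hnd : S.Nodup) (hcov : ∀ x ∈ l, f x ∈ S) :
    (S.flatMap (fun s => l.filter (fun x => f x == s))).Perm l := by
  induction S generalizing l with
  | nil =>
    have hn : l = [] := List.eq_nil_iff_forall_not_mem.mpr (fun x hx => by simpa using hcov x hx)
    simp [hn]
  | cons s S' ih =>
    rw [List.flatMap_cons]
    have hs : s ∉ S' := (List.nodup_cons.mp hnd).1
    have hnd' : S'.Nodup := (List.nodup_cons.mp hnd).2
    set l' := l.filter (fun x => !(f x == s)) with hl'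
    have hcov' : ∀ x ∈ l', f x ∈ S' := by
      intro x hx
      have hmem := List.mem_of_mem_filter hx
      have hne : f x ≠ s := by
        have := List.of_mem_filter hx
        simpa using this
      rcases List.mem_cons.mp (hcov x hmem) with h | h
      · exact absurd h hne
      · exact h
    have hfm : S'.flatMap (fun t => l.filter (fun x => f x == t))
        = S'.flatMap (fun t => l'.filter (fun x => f x == t)) := by
      apply List.flatMap_congr
      intro t ht
      rw [hl', List.filter_filter]
      apply List.filter_congr
      intro x _
      by_cases hxt : f x = t
      · have hne : f x ≠ s := fun h => hs ((hxt ▸ h : t = s) ▸ ht)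
        subst hxt
        simp [hne]
      · simp [hxt]
    rw [hfm]
    have h1 : (l.filter (fun x => f x == s) ++ S'.flatMap
        (fun t => l'.filter (fun x => f x == t))).Perm (l.filter (fun x => f x == s) ++ l') :=
      List.Perm.append_left _ (ih l' hnd' hcov')
    have h2 : (l.filter (fun x => f x == s) ++ l').Perm l := by
      rw [hl']
      exact List.filter_append_perm _ l
    exact h1.trans h2

-- pvTupleLt is exactly the Bool comparison of the nested-Lex key.
theorem pvTupleLt_eq_decide (p q : Int × List Char × Int) :
    pvTupleLt p q = decide (toLex (p.1, toLex (p.2.1, p.2.2)) < toLex (q.1, toLex (q.2.1, q.2.2))) := by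
  rcases p with ⟨a1, a2, a3⟩
  rcases q with ⟨b1, b2, b3⟩
  simp only [pvTupleLt, Prod.Lex.lt_iff, ofLex_toLex]
  split_ifs with h1 h2 h3 h4
  · simp [h1]
  · have : ¬ (a1 < b1 ∨ a1 = b1 ∧ (a2 < b2 ∨ a2 = b2 ∧ a3 < b3)) := by
      rintro (h | ⟨rfl, _⟩)
      · exact absurd h (lt_asymm h2)
      · exact lt_irrefl _ h2
    simp [this]
  · have he : a1 = b1 := le_antisymm (not_lt.mp h2) (not_lt.mp h1)
    simp [he, h3]
  · have he : a1 = b1 := le_antisymm (not_lt.mp h2) (not_lt.mp h1)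
    have : ¬ (a1 < b1 ∨ a1 = b1 ∧ (a2 < b2 ∨ a2 = b2 ∧ a3 < b3)) := by
      rintro (h | ⟨_, h | ⟨rfl, _⟩⟩)
      · exact absurd h (by simp [he])
      · exact absurd h (lt_asymm h4)
      · exact lt_irrefl _ h4
    simp [this]
  · have he : a1 = b1 := le_antisymm (not_lt.mp h2) (not_lt.mp h1)
    have he2 : a2 = b2 := le_antisymm (not_lt.mp h4) (not_lt.mp h3)
    by_cases h5 : a3 < b3
    · simp [he, he2, h5]
    · have : ¬ (a1 < b1 ∨ a1 = b1 ∧ (a2 < b2 ∨ a2 = b2 ∧ a3 < b3)) := by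
        rintro (h | ⟨_, h | ⟨_, h⟩⟩)
        · exact absurd h (by simp [he])
        · exact absurd h (by simp [he2])
        · exact h5 h
      rw [show (decide (a3 < b3)) = false from by simp [h5]]
      exact (decide_eq_false this).symm

-- the whole equivalence on duplicate-free symbol lists.
theorem pv_main (symbols : List String) (sector_map : List (String × String))
    (h : symbols.Nodup) :
    order_symbols_by_sector symbols sector_map = order_symbols_by_sector_alt symbols sector_map := by
  by_cases hnil : symbols = []
  · subst hnil; rfl
  · unfold order_symbols_by_sector
    rw [if_neg hnil]
    set f := pvSectorOf sector_map with hf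
    set oi := (PySem.List.enumerate symbols).foldl (fun d p => d.insert p.2 p.1)
      (PySem.Dict.empty : PySem.Dict String Int) with hoi
    set so := symbols.foldl (fun d sym =>
        let sector := f sym
        if d.contains sector then d else d.insert sector (d.size : Int))
        (PySem.Dict.empty : PySem.Dict String Int) with hso
    show symbols.foldl (fun acc sym => PySem.List.insertBy
      (fun a b => pvTupleLt
        (so.getD (f a) 10000, (f a).toList, oi.getD a 0)
        (so.getD (f b) 10000, (f b).toList, oi.getD b 0))
      sym acc) [] = _
    set key := fun sym => toLex ((so.getD (f sym) 10000 : Int),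
        toLex ((f sym).toList, oi.getD sym 0)) with hkey
    have hbefore : (fun (a b : String) => pvTupleLt
        (so.getD (f a) 10000, (f a).toList, oi.getD a 0)
        (so.getD (f b) 10000, (f b).toList, oi.getD b 0))
        = (fun a b => decide (key a < key b)) := by
      funext a b
      exact pvTupleLt_eq_decide _ _
    rw [hbefore, ← PySem.List.sorted_eq_foldl_insertBy]
    set S := PySem.List.dedup (symbols.map f) with hS
    rw [pv_alt_eq_flatMap]
    apply PySem.List.sorted_eq_of_perm_of_pairwise_lt
    · exact pv_flatMap_filter_perm f S symbols (PySem.List.nodup_dedup _)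
        (fun x hx => (PySem.List.mem_dedup _ _).mpr (List.mem_map_of_mem hx))
    · rw [List.pairwise_flatMap]
      constructor
      · -- inside one sector bucket: same rank, same sector, strictly increasing index
        intro s _
        have hpl : symbols.Pairwise (fun a b => oi.getD a 0 < oi.getD b 0) := by
          rw [List.pairwise_iff_getElem]
          intro i j hi hj hij
          rw [hoi, pv_getD_original_index symbols h i hi,
            pv_getD_original_index symbols h j hj]
          exact_mod_cast hij
        refine List.Pairwise.imp_of_mem ?_ (hpl.filter (fun x => f x == s))
        intro a b ha hb hab
        have hfa : f a = s := by simpa using List.of_mem_filter ha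
        have hfb : f b = s := by simpa using List.of_mem_filter hb
        rw [hkey]
        rw [Prod.Lex.lt_iff]
        simp only [ofLex_toLex]
        right
        refine ⟨by rw [hfa, hfb], ?_⟩
        rw [Prod.Lex.lt_iff]
        simp only [ofLex_toLex]
        right
        exact ⟨by rw [hfa, hfb], hab⟩
      · -- across buckets: ranks strictly increase with first appearance
        rw [List.pairwise_iff_getElem]
        intro i j hi hj hij x hx y hy
        have hfx : f x = S[i] := by simpa using List.of_mem_filter hx
        have hfy : f y = S[j] := by simpa using List.of_mem_filter hy
        rw [hkey]
        rw [Prod.Lex.lt_iff]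
        simp only [ofLex_toLex]
        left
        rw [hfx, hfy, hso, pv_getD_sector_order f symbols i hi,
          pv_getD_sector_order f symbols j hj]
        exact_mod_cast hij

-- ===== VERDICT (by name: the statement is the Claim_ definition above) =====
theorem order_symbols_by_sector_spec : Claim_equal_order_symbols_by_sector := by
  intro symbols sector_map _ hpre
  unfold Spec_order_symbols_by_sector
  exact pv_main symbols sector_map hpre
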